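-- pv_equiv track=rewrite | github.com/nfi/mcp-agents | mcpclient_speech/mcpclient_speech_face.py | compose_messages
-- ===== SOURCE A (Python) =====
-- messages_trunclen = 8
--
-- def compose_messages(sysp, mlst, augs):
--     n = 0
--     i1 = 0
--     i2 = 0
--     for i in reversed(range(len(mlst))):
--         if type(mlst[i])==dict and mlst[i]["role"] == 'user':
--             n += 1
--             if n == 1:
--                 i2 = i
--             if n == messages_trunclen:
--                 i1 = i
--                 break
--     return [sysp] + mlst[i1:i2] + augs + mlst[i2:]
-- ===== SOURCE B (Python) =====
-- messages_trunclen = 8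
--
-- def compose_messages(sysp, mlst, augs):
--     # one backward pass building the output segments directly: 'tail' becomes
--     # mlst[i2:] the moment the last user message is seen, 'acc' then collects
--     # the context window back to the 8th-last user message; no index arithmetic,
--     # no slicing.
--     acc = []
--     tail = []
--     n = 0
--     for m in reversed(mlst):
--         acc.append(m)
--         if type(m) == dict and m["role"] == 'user':
--             n += 1
--             if n == 1:
--                 tail = acc[::-1]
--                 acc = []
--             elif n == messages_trunclen:
--                 break
--     mid = acc[::-1]
--     if n == 0:
--         return [sysp] + augs + mid
--     return [sysp] + mid + augs + tail
-- ===== Notes on version B (the rewrite author's own statement) =====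
-- stated objective: alternative
-- what changed: Replaces A's reverse index scan with three counters plus post-hoc slicing by a single backward pass that accumulates the output segments (context window and tail) directly, with no index arithmetic and no slicing.
import Mathlib
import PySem

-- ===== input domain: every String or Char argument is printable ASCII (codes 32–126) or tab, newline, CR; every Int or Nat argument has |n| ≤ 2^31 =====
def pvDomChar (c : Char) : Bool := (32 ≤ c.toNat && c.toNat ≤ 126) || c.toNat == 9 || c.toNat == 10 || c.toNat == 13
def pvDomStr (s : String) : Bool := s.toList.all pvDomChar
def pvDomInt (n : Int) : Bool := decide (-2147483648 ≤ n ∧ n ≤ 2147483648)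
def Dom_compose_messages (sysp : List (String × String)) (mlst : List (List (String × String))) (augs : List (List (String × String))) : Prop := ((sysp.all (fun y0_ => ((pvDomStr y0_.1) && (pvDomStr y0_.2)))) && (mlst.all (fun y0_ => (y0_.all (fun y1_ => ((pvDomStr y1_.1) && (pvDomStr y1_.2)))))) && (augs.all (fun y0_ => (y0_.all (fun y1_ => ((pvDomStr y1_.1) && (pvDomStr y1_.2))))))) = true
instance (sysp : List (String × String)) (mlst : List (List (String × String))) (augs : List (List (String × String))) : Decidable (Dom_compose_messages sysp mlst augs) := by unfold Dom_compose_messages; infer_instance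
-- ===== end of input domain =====

-- B replaces A's reverse index scan with counters and slicing by one backward pass that
-- builds the output segments (context window and tail) directly, with no index arithmetic
-- and no slicing (objective: alternative); equal return value on Pre_ (= exactly the inputs
-- where A returns; outside Pre_ both Pythons raise the same KeyError).

-- m["role"] : first-match association-list lookup (exists on every dict A or B reads under
-- Pre_, so the default "" totalizes both ports exactly)
def pvRole (m : List (String × String)) : String :=
  ((m.find? (fun p => p.1 == "role")).map Prod.snd).getD ""

-- the shared membership test 'type(m)==dict and m["role"] == "user"'
def pvU (m : List (String × String)) : Bool := pvRole m == "user"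

-- ===== PORT A =====
-- the for-loop over reversed(range(len(mlst))) with state n, i1, i2 and break at n == 8
def pvALoop (mlst : List (List (String × String))) : List Int → Nat → Int → Int → Int × Int
  | [], _, i1, i2 => (i1, i2)
  | i :: rest, n, i1, i2 =>
    if pvU (PySem.List.pyGetD mlst i []) then
      let n' := n + 1
      let i2' := if n' = 1 then i else i2
      if n' = 8 then (i, i2') else pvALoop mlst rest n' i1 i2'
    else pvALoop mlst rest n i1 i2

def compose_messages (sysp : List (String × String)) (mlst : List (List (String × String))) (augs : List (List (String × String))) : List (List (String × String)) :=
  let r := pvALoop mlst (PySem.List.pyRange 0 mlst.length 1).reverse 0 0 0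
  [sysp] ++ PySem.List.slice mlst (some r.1) (some r.2) ++ augs ++ PySem.List.slice mlst (some r.2) none

-- ===== PORT B =====
-- the for-loop over reversed(mlst) with state acc, tail, n (tail = acc[::-1] at the first
-- user message, break at the 8th)
def pvBLoop : List (List (String × String)) → List (List (String × String)) → List (List (String × String)) → Nat → (List (List (String × String)) × List (List (String × String)) × Nat)
  | [], acc, tail, n => (acc, tail, n)
  | m :: rest, acc, tail, n =>
    let acc' := acc ++ [m]
    if pvU m then
      if n + 1 = 1 then pvBLoop rest [] acc'.reverse 1
      else if n + 1 = 8 then (acc', tail, 8)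
      else pvBLoop rest acc' tail (n + 1)
    else pvBLoop rest acc' tail n

def compose_messages_alt (sysp : List (String × String)) (mlst : List (List (String × String))) (augs : List (List (String × String))) : List (List (String × String)) :=
  let r := pvBLoop mlst.reverse [] [] 0
  let mid := r.1.reverse
  if r.2.2 = 0 then [sysp] ++ augs ++ mid else [sysp] ++ mid ++ augs ++ r.2.1

-- ===== PRECONDITION & SPEC =====
-- number of user messages strictly after index j
def pvUsersAfter (mlst : List (List (String × String))) (j : Nat) : Nat :=
  ((mlst.drop (j+1)).filter pvU).length

-- Pre_ is exactly the inputs on which the Python A (and B) returns: both raise KeyError iff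
-- the backward scan reaches a dict without a "role" key, i.e. iff some role-less dict has
-- fewer than 8 user messages after it.
def Pre_compose_messages (sysp : List (String × String)) (mlst : List (List (String × String))) (augs : List (List (String × String))) : Prop :=
  ∀ j ∈ List.range mlst.length, ((mlst.getD j []).find? (fun p => p.1 == "role") = none) → 8 ≤ pvUsersAfter mlst j
instance (sysp : List (String × String)) (mlst : List (List (String × String))) (augs : List (List (String × String))) : Decidable (Pre_compose_messages sysp mlst augs) := by unfold Pre_compose_messages; infer_instance

def pvWitness_compose_messages : (List (String × String)) × (List (List (String × String))) × (List (List (String × String))) :=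
  ([("role", "system")], [[("role", "user")], [("role", "assistant")], [("role", "user")]], [[("role", "tool")]])

def Spec_compose_messages (sysp : List (String × String)) (mlst : List (List (String × String))) (augs : List (List (String × String))) (out : List (List (String × String))) : Prop := out = compose_messages_alt sysp mlst augs
instance (sysp : List (String × String)) (mlst : List (List (String × String))) (augs : List (List (String × String))) (out : List (List (String × String))) : Decidable (Spec_compose_messages sysp mlst augs out) := by unfold Spec_compose_messages; infer_instance

-- ===== CLAIM (what is proved, stated in full; the proofs are below) =====
def Claim_equal_compose_messages : Prop := ∀ (sysp : List (String × String)) (mlst : List (List (String × String))) (augs : List (List (String × String))), Dom_compose_messages sysp mlst augs → Pre_compose_messages sysp mlst augs → Spec_compose_messages sysp mlst augs (compose_messages sysp mlst augs)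

-- ===== LEMMAS AND PROOFS =====

-- spec vocabulary: the shortest prefix of rs containing c user messages, and the rest of rs
-- after its first user message
def pvUpto : List (List (String × String)) → Nat → List (List (String × String))
  | [], _ => []
  | m :: rest, c => if pvU m then (if c ≤ 1 then [m] else m :: pvUpto rest (c-1)) else m :: pvUpto rest c

def pvRest : List (List (String × String)) → List (List (String × String))
  | [] => []
  | m :: rest => if pvU m then rest else pvRest rest

-- forward list of user-message indices
def pvNidx (l : List (List (String × String))) : List Nat :=
  (List.range l.length).filter (fun j => pvU (l.getD j []))

theorem pvNidx_append (l : List (List (String × String))) (m : List (String × String)) :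
    pvNidx (l ++ [m]) = pvNidx l ++ (if pvU m then [l.length] else []) := by
  unfold pvNidx
  rw [List.length_append, List.length_singleton, List.range_succ, List.filter_append]
  congr 1
  · apply List.filter_congr
    intro j hj
    rw [List.mem_range] at hj
    rw [List.getD_append _ _ _ _ hj]
  · have : (l ++ [m])[l.length]?.getD [] = m := by
      rw [List.getElem?_append_right (le_refl _)]
      simp
    cases h : pvU m <;> simp [List.filter, List.getD, this, h]

theorem pvNidx_lt (l : List (List (String × String))) : ∀ j ∈ pvNidx l, j < l.length := by
  intro j hj
  have := List.mem_of_mem_filter hj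
  simpa using this

theorem pvNidx_length (l : List (List (String × String))) :
    (pvNidx l).length = (l.filter pvU).length := by
  induction l using List.reverseRecOn with
  | nil => rfl
  | append_singleton l m ih =>
    rw [pvNidx_append, List.filter_append, List.length_append, List.length_append, ih]
    cases h : pvU m <;> simp [h]

-- core segment lemma: dropping at the c-th user index from the right is the reverse of the
-- shortest user-containing prefix of the reversed list
theorem pvDrop_eq_upto (l : List (List (String × String))) :
    ∀ c : Nat, 1 ≤ c → c ≤ (pvNidx l).length →
    l.drop ((pvNidx l).getD ((pvNidx l).length - c) 0) = (pvUpto l.reverse c).reverse := by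
  induction l using List.reverseRecOn with
  | nil => intro c h1 hk; simp [pvNidx] at hk; omega
  | append_singleton l m ih =>
    intro c h1 hk
    rw [pvNidx_append] at hk ⊢
    rw [List.reverse_append, List.reverse_singleton, List.singleton_append]
    cases hm : pvU m with
    | true =>
      simp only [hm, if_true] at hk ⊢
      rw [List.length_append, List.length_singleton] at hk ⊢
      by_cases hc1 : c = 1
      · subst hc1
        have hidx : (pvNidx l).length + 1 - 1 = (pvNidx l).length := by omega
        rw [hidx, List.getD_append_right _ _ _ _ (le_refl _)]
        simp only [Nat.sub_self, List.getD, List.getElem?_cons_zero, Option.getD_some]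
        rw [List.drop_left]
        simp [pvUpto, hm]
      · have hc2 : 2 ≤ c := by omega
        have hidx : (pvNidx l).length + 1 - c = (pvNidx l).length - (c - 1) := by omega
        have hlt : (pvNidx l).length - (c - 1) < (pvNidx l).length := by omega
        rw [hidx, List.getD_append _ _ _ _ hlt]
        have hj : (pvNidx l).getD ((pvNidx l).length - (c - 1)) 0 < l.length := by
          have hmem : (pvNidx l).getD ((pvNidx l).length - (c - 1)) 0 ∈ pvNidx l := by
            rw [List.getD_eq_getElem _ _ hlt]
            exact List.getElem_mem _
          exact pvNidx_lt l _ hmem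
        rw [List.drop_append_of_le_length (le_of_lt hj)]
        have hup : pvUpto (m :: l.reverse) c = m :: pvUpto l.reverse (c - 1) := by
          simp [pvUpto, hm]; omega
        rw [hup, List.reverse_cons, ih (c-1) (by omega) (by omega)]
    | false =>
      simp only [hm, Bool.false_eq_true, if_false, List.append_nil] at hk ⊢
      have hlt : (pvNidx l).length - c < (pvNidx l).length := by omega
      have hj : (pvNidx l).getD ((pvNidx l).length - c) 0 < l.length := by
        have hmem : (pvNidx l).getD ((pvNidx l).length - c) 0 ∈ pvNidx l := by
          rw [List.getD_eq_getElem _ _ hlt]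
          exact List.getElem_mem _
        exact pvNidx_lt l _ hmem
      rw [List.drop_append_of_le_length (le_of_lt hj)]
      have hup : pvUpto (m :: l.reverse) c = m :: pvUpto l.reverse c := by
        simp [pvUpto, hm]
      rw [hup, List.reverse_cons, ih c h1 (by omega)]

theorem pvUpto_rest_split (rs : List (List (String × String))) (h : rs.filter pvU ≠ []) :
    rs = pvUpto rs 1 ++ pvRest rs := by
  induction rs with
  | nil => simp at h
  | cons m rest ih =>
    cases hm : pvU m with
    | true => simp [pvUpto, pvRest, hm]
    | false =>
      rw [List.filter_cons_of_neg (by simp [hm])] at h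
      simpa [pvUpto, pvRest, hm] using ih h

theorem pvUpto_one_count (rs : List (List (String × String))) (h : rs.filter pvU ≠ []) :
    ((pvUpto rs 1).filter pvU).length = 1 := by
  induction rs with
  | nil => simp at h
  | cons m rest ih =>
    cases hm : pvU m with
    | true => simp [pvUpto, hm]
    | false =>
      rw [List.filter_cons_of_neg (by simp [hm])] at h
      simpa [pvUpto, hm] using ih h

theorem pvUpto_add (rs : List (List (String × String))) (c : Nat) (h : rs.filter pvU ≠ [])
    (hc : 1 ≤ c) : pvUpto rs (1 + c) = pvUpto rs 1 ++ pvUpto (pvRest rs) c := by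
  induction rs with
  | nil => simp at h
  | cons m rest ih =>
    cases hm : pvU m with
    | true =>
      have h1 : ¬ (1 + c ≤ 1) := by omega
      simp [pvUpto, pvRest, hm, h1, Nat.add_sub_cancel_left]
    | false =>
      rw [List.filter_cons_of_neg (by simp [hm])] at h
      simpa [pvUpto, pvRest, hm] using ih h

-- B's loop after the first user message: tail frozen, acc grows to the 8th user message
theorem pvBLoop_ge_one (rs : List (List (String × String))) :
    ∀ (acc tail : List (List (String × String))) (n : Nat), 1 ≤ n → n < 8 →
    pvBLoop rs acc tail n =
      if 8 - n ≤ (rs.filter pvU).length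
      then (acc ++ pvUpto rs (8 - n), tail, 8)
      else (acc ++ rs, tail, n + (rs.filter pvU).length) := by
  induction rs with
  | nil => intro acc tail n h1 h8; simp [pvBLoop]; omega
  | cons m rest ih =>
    intro acc tail n h1 h8
    cases hm : pvU m with
    | true =>
      have hne1 : ¬ (n + 1 = 1) := by omega
      by_cases h7 : n + 1 = 8
      · have h81 : 8 - n = 1 := by omega
        simp [pvBLoop, hm, hne1, h7, h81, pvUpto]
      · simp only [pvBLoop, hm, if_true, hne1, h7, ite_false]
        rw [ih (acc ++ [m]) tail (n+1) (by omega) (by omega)]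
        rw [List.filter_cons_of_pos hm]
        have hlen : (8 - n ≤ (rest.filter pvU).length + 1)
            ↔ (8 - (n+1) ≤ (rest.filter pvU).length) := by omega
        simp only [List.length_cons, hlen]
        split_ifs with hc
        · have hle : ¬ (8 - n ≤ 1) := by omega
          have h2 : 8 - (n+1) = 8 - n - 1 := by omega
          simp [pvUpto, hm, hle, h2]
        · simp; omega
    | false =>
      simp only [pvBLoop, hm, Bool.false_eq_true, ite_false]
      rw [ih (acc ++ [m]) tail n h1 h8, List.filter_cons_of_neg (by simp [hm])]
      split_ifs with hc
      · simp [pvUpto, hm]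
      · simp

-- B's loop before any user message
theorem pvBLoop_zero (rs : List (List (String × String))) :
    ∀ acc : List (List (String × String)),
    pvBLoop rs acc [] 0 =
      if (rs.filter pvU).length = 0 then (acc ++ rs, [], 0)
      else pvBLoop (pvRest rs) [] ((acc ++ pvUpto rs 1).reverse) 1 := by
  induction rs with
  | nil => intro acc; simp [pvBLoop]
  | cons m rest ih =>
    intro acc
    cases hm : pvU m with
    | true =>
      rw [List.filter_cons_of_pos hm]
      simp [pvBLoop, hm, pvUpto, pvRest]
    | false =>
      rw [List.filter_cons_of_neg (by simp [hm])]
      simp only [pvBLoop, hm, Bool.false_eq_true, ite_false]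
      rw [ih (acc ++ [m])]
      split_ifs with hc
      · simp
      · simp [pvUpto, pvRest, hm]

-- A-side: the loop with counter 1 <= n < 8: i2 is frozen, i1 becomes the (8-n)-th user index seen (if any)
theorem pvALoop_ge_one (mlst : List (List (String × String))) (L : List Int) :
    ∀ (n : Nat) (i1 i2 : Int), 1 ≤ n → n < 8 →
    pvALoop mlst L n i1 i2 =
      (if 8 - n ≤ (L.filter (fun i => pvU (PySem.List.pyGetD mlst i []))).length
       then (L.filter (fun i => pvU (PySem.List.pyGetD mlst i []))).getD (8 - n - 1) 0
       else i1, i2) := by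
  induction L with
  | nil => intro n i1 i2 h1 h8; simp [pvALoop]; omega
  | cons i rest ih =>
    intro n i1 i2 h1 h8
    cases hq : pvU (PySem.List.pyGetD mlst i []) with
    | true =>
      simp only [pvALoop, hq, if_true, List.filter_cons]
      by_cases h7 : n + 1 = 8
      · have hne1 : ¬ (n + 1 = 1) := by omega
        simp only [h7, ite_true]
        have h81 : 8 - n = 1 := by omega
        simp [h81]
      · have hne1 : ¬ (n + 1 = 1) := by omega
        simp only [hne1, h7, ite_false]
        rw [ih (n+1) i1 i2 (by omega) (by omega)]
        have hlen : (8 - n ≤ ((List.filter (fun i => pvU (PySem.List.pyGetD mlst i [])) rest).length + 1))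
            ↔ (8 - (n+1) ≤ (List.filter (fun i => pvU (PySem.List.pyGetD mlst i [])) rest).length) := by omega
        simp only [List.length_cons, hlen]
        congr 1
        split_ifs with hc
        · have h2 : 8 - n - 1 = (8 - (n+1) - 1) + 1 := by omega
          rw [h2]; simp [List.getD]
        · rfl
    | false =>
      simp only [pvALoop, hq, List.filter_cons, ite_false, Bool.false_eq_true]
      exact ih n i1 i2 h1 h8

theorem pvALoop_zero (mlst : List (List (String × String))) (L : List Int) :
    pvALoop mlst L 0 0 0 =
      (if 8 ≤ (L.filter (fun i => pvU (PySem.List.pyGetD mlst i []))).length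
       then (L.filter (fun i => pvU (PySem.List.pyGetD mlst i []))).getD 7 0
       else 0,
       (L.filter (fun i => pvU (PySem.List.pyGetD mlst i []))).headD 0) := by
  induction L with
  | nil => simp [pvALoop]
  | cons i rest ih =>
    cases hq : pvU (PySem.List.pyGetD mlst i []) with
    | true =>
      simp only [pvALoop, hq, List.filter_cons, ite_true]
      norm_num
      rw [pvALoop_ge_one mlst rest 1 0 i (by omega) (by omega)]
      split_ifs with h1 h2 <;> first | omega | rfl
    | false =>
      simp only [pvALoop, hq, List.filter_cons, ite_false, Bool.false_eq_true]
      exact ih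

-- A's Int index list is B's Nat index list, cast
theorem pvU_bridge (mlst : List (List (String × String))) :
    (PySem.List.pyRange 0 mlst.length 1).filter (fun i => pvU (PySem.List.pyGetD mlst i []))
      = (pvNidx mlst).map Int.ofNat := by
  unfold pvNidx
  rw [PySem.List.pyRange_zero_nat, List.filter_map]
  congr 1
  apply List.filter_congr
  intro j _
  simp [Function.comp, PySem.List.pyGetD_natCast]

theorem compose_messages_spec : Claim_equal_compose_messages := by
  intro sysp mlst augs _ _
  unfold Spec_compose_messages compose_messages compose_messages_alt
  rw [pvALoop_zero, List.filter_reverse, pvU_bridge, pvBLoop_zero]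
  set N := pvNidx mlst with hN
  set k := N.length with hk
  have hcnt : (mlst.reverse.filter pvU).length = k := by
    rw [List.filter_reverse, List.length_reverse, hk, hN, pvNidx_length]
  have hFlen : ((N.map Int.ofNat).reverse).length = k := by
    rw [List.length_reverse, List.length_map]
  by_cases hk0 : k = 0
  · -- no user message: both return [sysp] ++ augs ++ mlst
    have hNnil : N = [] := by rwa [← List.length_eq_zero_iff, ← hk]
    simp only [hcnt, hk0, if_pos rfl, hNnil, List.map_nil, List.reverse_nil, List.length_nil,
      List.headD_nil, List.nil_append, List.reverse_reverse]
    norm_num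
    simp [PySem.List.slice, PySem.List.clampIdx]
  · have hk1 : 1 ≤ k := by omega
    have hne : mlst.reverse.filter pvU ≠ [] := by
      intro h; rw [h] at hcnt; simp at hcnt; omega
    have hNne : N ≠ [] := by intro h; rw [h] at hk; simp at hk; omega
    -- split of the reversed list at its first user message
    have hsplit := pvUpto_rest_split mlst.reverse hne
    have hq : ((pvRest mlst.reverse).filter pvU).length = k - 1 := by
      have := congrArg (fun t => (t.filter pvU).length) hsplit
      simp only [List.filter_append, List.length_append] at this
      rw [hcnt, pvUpto_one_count mlst.reverse hne] at this
      omega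
    rw [hcnt]
    simp only [hk0, if_false, ite_false]
    rw [pvBLoop_ge_one (pvRest mlst.reverse) [] _ 1 (le_refl 1) (by omega), hq]
    -- A's i2 is the last user index
    set i2v := N.getD (k - 1) 0 with hi2v
    have hi2lt : i2v < mlst.length := by
      apply pvNidx_lt
      rw [hi2v, List.getD_eq_getElem _ _ (by omega : k - 1 < N.length)]
      exact List.getElem_mem _
    have hlast : ((N.map Int.ofNat).reverse).headD 0 = (i2v : Int) := by
      rw [List.headD_eq_head?_getD, List.head?_reverse, List.getLast?_map,
        List.getLast?_eq_some_getLast hNne]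
      simp only [Option.map_some, Option.getD_some]
      congr 1
      rw [hi2v, List.getD_eq_getElem _ _ (by omega : k - 1 < N.length),
        List.getLast_eq_getElem]
    have htail : PySem.List.slice mlst (some (i2v : Int)) none = (pvUpto mlst.reverse 1).reverse := by
      rw [PySem.List.slice_from_natCast]
      exact pvDrop_eq_upto mlst 1 (le_refl 1) (by omega)
    rw [hlast]
    by_cases hk8 : 8 ≤ k
    · -- at least 8 user messages: splice from the 8th-last one
      rw [if_pos (by omega : 7 ≤ k - 1)]
      set i1v := N.getD (k - 8) 0 with hi1v
      have hget7 : ((N.map Int.ofNat).reverse).getD 7 0 = (i1v : Int) := by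
        rw [List.getD_eq_getElem _ _ (by rw [hFlen]; omega : 7 < ((N.map Int.ofNat).reverse).length)]
        rw [List.getElem_reverse, List.getElem_map]
        congr 1
        rw [hi1v, List.getD_eq_getElem _ _ (by omega : k - 8 < N.length)]
        apply getElem_congr_idx
        simp only [List.length_map]
        omega
      have hi1lt : i1v < mlst.length := by
        apply pvNidx_lt
        rw [hi1v, List.getD_eq_getElem _ _ (by omega : k - 8 < N.length)]
        exact List.getElem_mem _
      have hdrop8 : mlst.drop i1v = (pvUpto (pvRest mlst.reverse) 7).reverse ++ mlst.drop i2v := by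
        have h8 : pvUpto mlst.reverse 8 = pvUpto mlst.reverse 1 ++ pvUpto (pvRest mlst.reverse) 7 := by
          have := pvUpto_add mlst.reverse 7 hne (by omega)
          simpa using this
        have hd := pvDrop_eq_upto mlst 8 (by omega) (by omega)
        rw [h8, List.reverse_append] at hd
        rw [hd]
        congr 1
        rw [← pvDrop_eq_upto mlst 1 (le_refl 1) (by omega)]
      have hmidlen : ((pvUpto (pvRest mlst.reverse) 7).reverse).length = i2v - i1v := by
        have := congrArg List.length hdrop8
        simp only [List.length_drop, List.length_append] at this
        omega
      have hmid : PySem.List.slice mlst (some (i1v : Int)) (some (i2v : Int))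
          = (pvUpto (pvRest mlst.reverse) 7).reverse := by
        rw [PySem.List.slice_natCast, hdrop8, ← hmidlen]
        exact List.take_left' rfl
      have hk8' : 8 ≤ ((N.map Int.ofNat).reverse).length := by rw [hFlen]; exact hk8
      simp only [if_pos hk8', hget7]
      norm_num [hmid]
      rw [← pvDrop_eq_upto mlst 1 (le_refl 1) (by omega)]
    · -- between 1 and 7 user messages: splice from the start
      rw [if_neg (by omega : ¬ 7 ≤ k - 1)]
      have hk8' : ¬ 8 ≤ ((N.map Int.ofNat).reverse).length := by rw [hFlen]; exact hk8
      have hn0 : ¬ (1 + (k - 1) = 0) := by omega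
      have hmid : PySem.List.slice mlst (some (0 : Int)) (some (i2v : Int))
          = (pvRest mlst.reverse).reverse := by
        have hml : mlst = (pvRest mlst.reverse).reverse ++ mlst.drop i2v := by
          conv_lhs => rw [← List.reverse_reverse mlst]
          conv_lhs => rw [hsplit]
          rw [List.reverse_append]
          congr 1
          rw [← pvDrop_eq_upto mlst 1 (le_refl 1) (by omega)]
        have hlen : ((pvRest mlst.reverse).reverse).length = i2v := by
          have := congrArg List.length hml
          simp only [List.length_append, List.length_drop] at this
          omega
        rw [show ((0:Int)) = (((0:Nat)):Int) from rfl, PySem.List.slice_natCast,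
          List.drop_zero, Nat.sub_zero]
        conv_lhs => rw [hml]
        rw [← hlen]
        exact List.take_left' rfl
      simp only [if_neg hk8']
      norm_num [hn0, hmid]
      rw [← pvDrop_eq_upto mlst 1 (le_refl 1) (by omega)]
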